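-- pv_equiv track=rewrite | github.com/andrewkumbula/admin_rms | app/modules/analytics/routes.py | _count_consecutive_booking_starts
-- ===== SOURCE A (Python) =====
-- from typing import Any, Dict, List, Optional, Tuple
--
-- def _count_consecutive_booking_starts(
--     free_by_slot: List[int],
--     day_by_slot: List[str],
--     slot_minutes: int,
--     need_minutes: int,
-- ) -> int:
--     """
--     Оценка «сколько записей поместится» для длительности need_minutes:
--     - запись занимает ceil(need_minutes / slot_minutes) подряд слотов;
--     - в каждом слоте окна должен быть полный запас (free >= slot_minutes);
--     - внутри дня считаем жадно без пересечений окон (non-overlap).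
--     """
--     if slot_minutes <= 0 or need_minutes <= 0:
--         return 0
--     n = (need_minutes + slot_minutes - 1) // slot_minutes
--     if n <= 0 or len(free_by_slot) < n or len(free_by_slot) != len(day_by_slot):
--         return 0
--
--     cnt = 0
--     i = 0
--     while i <= len(free_by_slot) - n:
--         same_day = all(day_by_slot[i + j] == day_by_slot[i] for j in range(n))
--         fits = same_day and all(free_by_slot[i + j] >= slot_minutes for j in range(n))
--         if fits:
--             cnt += 1
--             i += n
--         else:
--             i += 1
--     return cnt
-- ===== SOURCE B (Python) =====
-- from typing import List
--
-- def _count_consecutive_booking_starts(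
--     free_by_slot: List[int],
--     day_by_slot: List[str],
--     slot_minutes: int,
--     need_minutes: int,
-- ) -> int:
--     # One reverse pass precomputes run[i] = length of the maximal contiguous
--     # stretch starting at i of fully-free slots on the same day; the greedy
--     # loop then checks each window in O(1) instead of rescanning n slots.
--     if slot_minutes <= 0 or need_minutes <= 0:
--         return 0
--     n = -(-need_minutes // slot_minutes)
--     L = len(free_by_slot)
--     if L < n or L != len(day_by_slot):
--         return 0
--     run = [0] * L
--     for i in range(L - 1, -1, -1):
--         if free_by_slot[i] >= slot_minutes:
--             if i + 1 < L and day_by_slot[i + 1] == day_by_slot[i]: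
--                 run[i] = run[i + 1] + 1
--             else:
--                 run[i] = 1
--     cnt = 0
--     i = 0
--     while i <= L - n:
--         if run[i] >= n:
--             cnt += 1
--             i += n
--         else:
--             i += 1
--     return cnt
-- ===== Notes on version B (the rewrite author's own statement) =====
-- stated objective: faster
-- what changed: Replaces A's per-position O(n) rescan of each candidate window by a single reverse pass that precomputes contiguous fully-free same-day run lengths, so the greedy loop checks each window in O(1).
import Mathlib
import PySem

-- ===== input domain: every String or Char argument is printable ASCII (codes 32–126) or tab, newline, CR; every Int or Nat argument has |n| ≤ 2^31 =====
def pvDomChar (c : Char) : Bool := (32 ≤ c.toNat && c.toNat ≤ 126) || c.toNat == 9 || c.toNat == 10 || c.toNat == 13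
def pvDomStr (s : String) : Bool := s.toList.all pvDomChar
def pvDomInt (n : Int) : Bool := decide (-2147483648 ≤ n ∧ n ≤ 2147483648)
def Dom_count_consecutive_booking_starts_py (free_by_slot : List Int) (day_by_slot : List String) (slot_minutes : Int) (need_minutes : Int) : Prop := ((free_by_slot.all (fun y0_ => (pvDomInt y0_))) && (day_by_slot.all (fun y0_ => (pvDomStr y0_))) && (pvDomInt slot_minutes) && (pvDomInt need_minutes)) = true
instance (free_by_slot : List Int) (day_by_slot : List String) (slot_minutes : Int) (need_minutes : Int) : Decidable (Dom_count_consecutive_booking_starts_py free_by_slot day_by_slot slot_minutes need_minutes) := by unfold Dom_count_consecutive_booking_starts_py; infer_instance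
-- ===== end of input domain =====

-- B replaces A's O(n)-per-window rescans by one reverse pass precomputing contiguous
-- ok+same-day run lengths, making each greedy fit check O(1) (objective: faster).

-- ===== PORT A =====
-- A's window test: indices i+j are always in range when the loop guard holds
-- (i ≤ len-n, equal lengths), so getD is exact there (Python would raise only out of range,
-- which A's loop never reaches).
def pvFitsA (free_by_slot : List Int) (day_by_slot : List String) (slot_minutes : Int) (n i : Nat) : Bool :=
  ((List.range n).all fun j => day_by_slot.getD (i + j) "" == day_by_slot.getD i "") &&
  ((List.range n).all fun j => decide (slot_minutes ≤ free_by_slot.getD (i + j) 0))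

-- A's while-loop; fuel = len+1 suffices since n ≥ 1 on every reachable call.
def pvLoopA (free_by_slot : List Int) (day_by_slot : List String) (slot_minutes : Int) (n : Nat) : Nat → Nat → Int → Int
  | 0, _, cnt => cnt
  | fuel + 1, i, cnt =>
    if i ≤ free_by_slot.length - n then
      if pvFitsA free_by_slot day_by_slot slot_minutes n i then
        pvLoopA free_by_slot day_by_slot slot_minutes n fuel (i + n) (cnt + 1)
      else
        pvLoopA free_by_slot day_by_slot slot_minutes n fuel (i + 1) cnt
    else cnt

def count_consecutive_booking_starts_py (free_by_slot : List Int) (day_by_slot : List String) (slot_minutes : Int) (need_minutes : Int) : Int :=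
  if slot_minutes ≤ 0 ∨ need_minutes ≤ 0 then 0
  else
    let n : Int := PySem.Int.floordiv (need_minutes + slot_minutes - 1) slot_minutes
    if n ≤ 0 ∨ (free_by_slot.length : Int) < n ∨ free_by_slot.length ≠ day_by_slot.length then 0
    else pvLoopA free_by_slot day_by_slot slot_minutes n.toNat (free_by_slot.length + 1) 0 0

-- ===== PORT B =====
-- Source B's reverse pass building run[i] from run[i+1]; structural recursion builds the
-- list back-to-front exactly as the range(L-1,-1,-1) loop fills it.
def pvRuns (slot_minutes : Int) : List Int → List String → List Nat
  | f :: fs, d :: ds =>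
    let r := pvRuns slot_minutes fs ds
    (if slot_minutes ≤ f then
       match ds with
       | d2 :: _ => if d2 == d then r.headD 0 + 1 else 1
       | [] => 1
     else 0) :: r
  | _, _ => []

def pvLoopB (run : List Nat) (L n : Nat) : Nat → Nat → Int → Int
  | 0, _, cnt => cnt
  | fuel + 1, i, cnt =>
    if i ≤ L - n then
      if n ≤ run.getD i 0 then pvLoopB run L n fuel (i + n) (cnt + 1)
      else pvLoopB run L n fuel (i + 1) cnt
    else cnt

def count_consecutive_booking_starts_py_alt (free_by_slot : List Int) (day_by_slot : List String) (slot_minutes : Int) (need_minutes : Int) : Int :=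
  if slot_minutes ≤ 0 ∨ need_minutes ≤ 0 then 0
  else
    let n : Int := -(PySem.Int.floordiv (-need_minutes) slot_minutes)
    if (free_by_slot.length : Int) < n ∨ free_by_slot.length ≠ day_by_slot.length then 0
    else pvLoopB (pvRuns slot_minutes free_by_slot day_by_slot) free_by_slot.length n.toNat (free_by_slot.length + 1) 0 0

-- ===== PRECONDITION & SPEC =====
def Spec_count_consecutive_booking_starts_py (free_by_slot : List Int) (day_by_slot : List String) (slot_minutes : Int) (need_minutes : Int) (out : Int) : Prop := out = count_consecutive_booking_starts_py_alt free_by_slot day_by_slot slot_minutes need_minutes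
instance (free_by_slot : List Int) (day_by_slot : List String) (slot_minutes : Int) (need_minutes : Int) (out : Int) : Decidable (Spec_count_consecutive_booking_starts_py free_by_slot day_by_slot slot_minutes need_minutes out) := by unfold Spec_count_consecutive_booking_starts_py; infer_instance

-- ===== CLAIM (what is proved, stated in full; the proofs are below) =====
def Claim_equal_count_consecutive_booking_starts_py : Prop := ∀ (free_by_slot : List Int) (day_by_slot : List String) (slot_minutes : Int) (need_minutes : Int), Dom_count_consecutive_booking_starts_py free_by_slot day_by_slot slot_minutes need_minutes → Spec_count_consecutive_booking_starts_py free_by_slot day_by_slot slot_minutes need_minutes (count_consecutive_booking_starts_py free_by_slot day_by_slot slot_minutes need_minutes)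

-- ===== LEMMAS AND PROOFS =====

-- ceiling division: A's (need+sm-1)//sm equals B's -((-need)//sm) for sm > 0
theorem pvCeil_eq (need sm : Int) (hsm : 0 < sm) :
    -(PySem.Int.floordiv (-need) sm) = PySem.Int.floordiv (need + sm - 1) sm := by
  have h1 := PySem.Int.floordiv_eq_iff_of_pos (a := need + sm - 1) (b := sm)
    (q := PySem.Int.floordiv (need + sm - 1) sm) hsm
  have h2 := (h1.mp rfl)
  rw [PySem.Int.neg_floordiv_neg_eq_iff_of_pos hsm]
  constructor <;> nlinarith [h2.1, h2.2]

theorem pvCeil_pos (need sm : Int) (hsm : 0 < sm) (hn : 0 < need) :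
    1 ≤ PySem.Int.floordiv (need + sm - 1) sm := by
  rw [PySem.Int.le_floordiv_iff_mul_le hsm]
  omega

-- run length at the head of a suffix (proof-side characterisation of pvRuns entries)
def pvRunLen (slot_minutes : Int) : List Int → List String → Nat
  | f :: fs, d :: ds =>
    if slot_minutes ≤ f then
      match ds with
      | d2 :: _ => if d2 == d then pvRunLen slot_minutes fs ds + 1 else 1
      | [] => 1
    else 0
  | _, _ => 0

theorem pvRuns_head (sm : Int) (F : List Int) (D : List String) :
    (pvRuns sm F D)[0]?.getD 0 = pvRunLen sm F D := by
  induction F generalizing D with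
  | nil => cases D <;> simp [pvRuns, pvRunLen]
  | cons f fs ih =>
    cases D with
    | nil => simp [pvRuns, pvRunLen]
    | cons d ds =>
      cases ds with
      | nil => simp [pvRuns, pvRunLen]
      | cons d2 ds' => simp [pvRuns, pvRunLen, List.head?_eq_getElem?, ih]

theorem pvRuns_getD (sm : Int) (i : Nat) (F : List Int) (D : List String) :
    (pvRuns sm F D).getD i 0 = pvRunLen sm (F.drop i) (D.drop i) := by
  induction i generalizing F D with
  | zero => simp [pvRuns_head]
  | succ i ih =>
    cases F with
    | nil => simp [pvRuns, pvRunLen]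
    | cons f fs =>
      cases D with
      | nil => simp [pvRuns]; cases fs.drop i <;> simp [pvRunLen]
      | cons d ds => simpa [pvRuns] using ih fs ds

-- A's window condition over a suffix, as a Prop
def pvWindow (sm : Int) (n : Nat) (F : List Int) (D : List String) : Prop :=
  (∀ j < n, D.getD j "" = D.getD 0 "") ∧ (∀ j < n, sm ≤ F.getD j 0)

theorem pvFitsA_iff (free : List Int) (day : List String) (sm : Int) (n i : Nat) :
    pvFitsA free day sm n i = true ↔ pvWindow sm n (free.drop i) (day.drop i) := by
  simp [pvFitsA, pvWindow, List.all_eq_true, List.mem_range, beq_iff_eq,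
    and_comm]

theorem pvForall_lt_succ {α : Type} (P : α → Prop) (x : α) (l : List α) (dflt : α) (k : Nat) :
    (∀ j < k + 1, P ((x :: l).getD j dflt)) ↔ P x ∧ ∀ j < k, P (l.getD j dflt) := by
  constructor
  · intro h
    exact ⟨by simpa using h 0 (by omega), fun j hj => by simpa using h (j + 1) (by omega)⟩
  · rintro ⟨hx, h⟩ j hj
    cases j with
    | zero => simpa
    | succ j => simpa using h j (by omega)

theorem pvWindow_iff_runLen (sm : Int) (n : Nat) (F : List Int) (D : List String)
    (hn : 1 ≤ n) (hnF : n ≤ F.length) (hlen : F.length = D.length) :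
    pvWindow sm n F D ↔ n ≤ pvRunLen sm F D := by
  induction F generalizing D n with
  | nil => simp at hnF; omega
  | cons f fs ih =>
    cases D with
    | nil => simp at hlen
    | cons d ds =>
      cases n with
      | zero => omega
      | succ m =>
        cases m with
        | zero =>
          simp only [pvWindow]
          cases ds with
          | nil =>
            simp [pvRunLen]
            split_ifs with h <;> simp [h]
          | cons d2 ds' =>
            simp [pvRunLen]
            split_ifs with h h2 <;> simp [h]
        | succ m' =>
          cases fs with
          | nil => simp at hnF
          | cons f2 fs' =>
            cases ds with
            | nil => simp at hlen
            | cons d2 ds' =>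
              have hIH := ih (n := m' + 1) (D := d2 :: ds') (by omega)
                (by simp at hnF ⊢; omega) (by simp at hlen ⊢; omega)
              have hday : (∀ j < m' + 1, (d2 :: ds').getD j "" = d)
                  ↔ (d2 = d ∧ ∀ j < m' + 1, (d2 :: ds').getD j "" = d2) := by
                constructor
                · intro h
                  have h0 : d2 = d := by simpa using h 0 (by omega)
                  exact ⟨h0, fun j hj => by rw [h j hj, ← h0]⟩
                · rintro ⟨he, h⟩ j hj
                  rw [h j hj, he]
              have hrhs : (m' + 1 + 1 ≤ pvRunLen sm (f :: f2 :: fs') (d :: d2 :: ds'))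
                  ↔ (sm ≤ f ∧ d2 = d ∧ m' + 1 ≤ pvRunLen sm (f2 :: fs') (d2 :: ds')) := by
                simp only [pvRunLen]
                split_ifs with h1 h2 <;> simp_all
              simp only [pvWindow, List.getD_cons_zero] at hIH ⊢
              rw [hrhs, pvForall_lt_succ (fun s => s = d) d (d2 :: ds') "" (m' + 1),
                pvForall_lt_succ (fun x => sm ≤ x) f (f2 :: fs') 0 (m' + 1), hday, ← hIH]
              tauto

theorem pvLoop_eq (free : List Int) (day : List String) (sm : Int) (n : Nat)
    (hn : 1 ≤ n) (hnL : n ≤ free.length) (hlen : free.length = day.length) :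
    ∀ fuel i cnt, pvLoopA free day sm n fuel i cnt
      = pvLoopB (pvRuns sm free day) free.length n fuel i cnt := by
  intro fuel
  induction fuel with
  | zero => intro i cnt; rfl
  | succ fuel ih =>
    intro i cnt
    simp only [pvLoopA, pvLoopB]
    by_cases hi : i ≤ free.length - n
    · simp only [if_pos hi]
      have hfit : pvFitsA free day sm n i = true ↔ n ≤ (pvRuns sm free day).getD i 0 := by
        rw [pvFitsA_iff, pvRuns_getD]
        apply pvWindow_iff_runLen sm n _ _ hn ?_ ?_
        · simp; omega
        · simp [hlen]
      by_cases hf : pvFitsA free day sm n i = true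
      · rw [if_pos hf, if_pos (hfit.mp hf), ih]
      · rw [if_neg hf, if_neg (fun hc => hf (hfit.mpr hc)), ih]
    · simp only [if_neg hi]

-- ===== VERDICT (by name: the statement is the Claim_ definition above) =====
theorem count_consecutive_booking_starts_py_spec : Claim_equal_count_consecutive_booking_starts_py := by
  intro free day sm need _
  simp only [Spec_count_consecutive_booking_starts_py, count_consecutive_booking_starts_py,
    count_consecutive_booking_starts_py_alt]
  by_cases h0 : sm ≤ 0 ∨ need ≤ 0
  · rw [if_pos h0, if_pos h0]
  · rw [if_neg h0, if_neg h0]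
    push Not at h0
    have hsm : 0 < sm := by omega
    have hneed : 0 < need := by omega
    have hEq := pvCeil_eq need sm hsm
    have h1 := pvCeil_pos need sm hsm hneed
    rw [hEq]
    by_cases hc : (free.length : Int) < PySem.Int.floordiv (need + sm - 1) sm
      ∨ free.length ≠ day.length
    · rw [if_pos (Or.inr hc), if_pos hc]
    · have hA : ¬ (PySem.Int.floordiv (need + sm - 1) sm ≤ 0
          ∨ ((free.length : Int) < PySem.Int.floordiv (need + sm - 1) sm
             ∨ free.length ≠ day.length)) := by
        intro h
        rcases h with h | h
        · omega
        · exact hc h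
      rw [if_neg hA, if_neg hc]
      push Not at hc
      exact pvLoop_eq free day sm _ (by omega) (by omega) hc.2 _ 0 0
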